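-- pv_equiv track=rewrite | github.com/Pedrogush/MTGO_Tools | services/search_service/deck_search.py | group_cards_by_type
-- ===== SOURCE A (Python) =====
-- from typing import TYPE_CHECKING, Any
--
-- def group_cards_by_type(cards: list[dict[str, Any]]) -> dict[str, list[dict[str, Any]]]:
--     groups: dict[str, list[dict[str, Any]]] = {
--         "Creature": [],
--         "Instant": [],
--         "Sorcery": [],
--         "Enchantment": [],
--         "Artifact": [],
--         "Planeswalker": [],
--         "Land": [],
--         "Other": [],
--     }
--
--     for card in cards:
--         type_line = card.get("type_line", "") or card.get("type", "")
--         type_line_lower = type_line.lower()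
--
--         assigned = False
--         for card_type in groups.keys():
--             if card_type.lower() in type_line_lower:
--                 groups[card_type].append(card)
--                 assigned = True
--                 break
--
--         if not assigned:
--             groups["Other"].append(card)
--
--     return {k: v for k, v in groups.items() if v}
-- ===== SOURCE B (Python) =====
-- def group_cards_by_type(cards: list) -> dict:
--     def type_of(card):
--         return (card.get("type_line", "") or card.get("type", "")).lower()
--
--     categories = ["Creature", "Instant", "Sorcery", "Enchantment", "Artifact",
--                   "Planeswalker", "Land"]
--     result = {}
--     remaining = list(cards)
--     for cat in categories:
--         needle = cat.lower()
--         matched = [c for c in remaining if needle in type_of(c)]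
--         remaining = [c for c in remaining if needle not in type_of(c)]
--         if matched:
--             result[cat] = matched
--     if remaining:
--         result["Other"] = remaining
--     return result
-- ===== Notes on version B (the rewrite author's own statement) =====
-- stated objective: alternative
-- what changed: B loops over the seven fixed categories (instead of cards-outer with an inner key scan and break), stably splitting a shrinking 'remaining' list into matched/unmatched per category and assigning the leftovers to 'Other', building the result dict category-by-category instead of filtering a pre-seeded dict of empty buckets.
import Mathlib
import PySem

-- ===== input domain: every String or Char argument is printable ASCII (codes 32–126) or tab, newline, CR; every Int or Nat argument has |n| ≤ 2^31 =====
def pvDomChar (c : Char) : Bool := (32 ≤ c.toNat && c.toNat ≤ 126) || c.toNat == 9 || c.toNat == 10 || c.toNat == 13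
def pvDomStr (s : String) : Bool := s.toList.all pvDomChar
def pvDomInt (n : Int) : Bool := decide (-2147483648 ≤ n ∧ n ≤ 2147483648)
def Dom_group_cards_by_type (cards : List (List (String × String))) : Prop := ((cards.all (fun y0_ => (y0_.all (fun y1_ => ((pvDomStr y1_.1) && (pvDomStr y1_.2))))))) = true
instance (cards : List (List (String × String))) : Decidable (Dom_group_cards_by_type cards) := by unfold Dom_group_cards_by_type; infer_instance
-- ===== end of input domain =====

-- B re-groups by looping over the seven fixed categories, splitting a shrinking `remaining`
-- list per category, instead of A's cards-outer loop with an inner key scan over a pre-seeded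
-- dict of empty buckets (objective: alternative decomposition, same cost).

-- shared type-extraction helper: (card.get("type_line","") or card.get("type","")).lower()
-- card.get on an association list = first match, "" when absent (exact for Python dicts)
def pyGetStr (card : List (String × String)) (k : String) : String :=
  match card.find? (fun p => p.1 == k) with
  | some p => p.2
  | none => ""

def cardType (card : List (String × String)) : String :=
  let t := pyGetStr card "type_line"
  PySem.Str.lower (if t ≠ "" then t else pyGetStr card "type")

-- ===== PORT A =====
def groupsInit : PySem.Dict String (List (List (String × String))) :=
  PySem.Dict.ofList [("Creature", []), ("Instant", []), ("Sorcery", []), ("Enchantment", []),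
                     ("Artifact", []), ("Planeswalker", []), ("Land", []), ("Other", [])]

-- loop body: inner `for card_type in groups.keys(): … break` = find?; append = modify
def stepA (groups : PySem.Dict String (List (List (String × String))))
    (card : List (String × String)) : PySem.Dict String (List (List (String × String))) :=
  let type_line_lower := cardType card
  match groups.keys.find? (fun k => PySem.Str.isIn (PySem.Str.lower k) type_line_lower) with
  | some k => groups.modify k [] (fun v => v ++ [card])
  | none => groups.modify "Other" [] (fun v => v ++ [card])

def group_cards_by_type (cards : List (List (String × String))) :
    List (String × List (List (String × String))) :=
  ((cards.foldl stepA groupsInit).items).filter (fun kv => !kv.2.isEmpty)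

-- ===== PORT B =====
def catsB : List String :=
  ["Creature", "Instant", "Sorcery", "Enchantment", "Artifact", "Planeswalker", "Land"]

def stepB (st : List (String × List (List (String × String))) × List (List (String × String)))
    (cat : String) : List (String × List (List (String × String))) × List (List (String × String)) :=
  let needle := PySem.Str.lower cat
  let matched := st.2.filter (fun c => PySem.Str.isIn needle (cardType c))
  let remaining := st.2.filter (fun c => !PySem.Str.isIn needle (cardType c))
  (if matched.isEmpty then st.1 else st.1 ++ [(cat, matched)], remaining)

def group_cards_by_type_alt (cards : List (List (String × String))) :
    List (String × List (List (String × String))) :=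
  let fin := catsB.foldl stepB ([], cards)
  if fin.2.isEmpty then fin.1 else fin.1 ++ [("Other", fin.2)]

-- ===== PRECONDITION & SPEC =====
def Spec_group_cards_by_type (cards : List (List (String × String))) (out : List (String × List (List (String × String)))) : Prop := out = group_cards_by_type_alt cards
instance (cards : List (List (String × String))) (out : List (String × List (List (String × String)))) : Decidable (Spec_group_cards_by_type cards out) := by unfold Spec_group_cards_by_type; infer_instance

-- ===== CLAIM (what is proved, stated in full; the proofs are below) =====
def Claim_equal_group_cards_by_type : Prop := ∀ (cards : List (List (String × String))), Dom_group_cards_by_type cards → Spec_group_cards_by_type cards (group_cards_by_type cards)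

-- ===== LEMMAS AND PROOFS =====

-- the eight bucket keys, in A's insertion order
def keys8 : List String :=
  ["Creature", "Instant", "Sorcery", "Enchantment", "Artifact", "Planeswalker", "Land", "Other"]

def mtch (k : String) (c : List (String × String)) : Bool :=
  PySem.Str.isIn (PySem.Str.lower k) (cardType c)

-- the bucket a card lands in: first matching key, else "Other"
def catOf (c : List (String × String)) : String :=
  ((keys8.find? (fun k => mtch k c)).getD "Other")

-- the common canonical form of both results
def canon (cards : List (List (String × String))) :
    List (String × List (List (String × String))) :=
  (keys8.map (fun k => (k, cards.filter (fun c => catOf c == k)))).filter (fun kv => !kv.2.isEmpty)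

theorem catOf_mem_keys8 (c : List (String × String)) : catOf c ∈ keys8 := by
  unfold catOf
  cases hf : keys8.find? (fun k => mtch k c) with
  | none => simp [keys8]
  | some k => simpa using List.mem_of_find?_eq_some hf

theorem mtch_of_catOf_ne_other (c : List (String × String)) (h : catOf c ≠ "Other") :
    mtch (catOf c) c = true := by
  unfold catOf at *
  cases hf : keys8.find? (fun k => mtch k c) with
  | none => simp [hf] at h
  | some k => simpa [hf] using List.find?_some hf

theorem catOf_of_mtch (pre : List String) (cat : String) (post : List String)
    (h : keys8 = pre ++ cat :: post) (c : List (String × String)) (hm : mtch cat c = true) :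
    catOf c ∈ pre ∨ catOf c = cat := by
  unfold catOf
  rw [h, List.find?_append]
  cases hp : pre.find? (fun k => mtch k c) with
  | some k =>
    left; simpa using List.mem_of_find?_eq_some hp
  | none =>
    right; simp [hm]

theorem loopA (cards : List (List (String × String)))
    (d : PySem.Dict String (List (List (String × String)))) (hk : d.keys = keys8) :
    cards.foldl stepA d = cards.foldl (fun d c => d.modify (catOf c) [] (fun v => v ++ [c])) d := by
  induction cards generalizing d with
  | nil => rfl
  | cons c l ih =>
    have hstep : stepA d c = d.modify (catOf c) [] (fun v => v ++ [c]) := by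
      simp only [stepA, catOf, mtch, hk]
      cases hf : keys8.find? (fun k => PySem.Str.isIn (PySem.Str.lower k) (cardType c)) with
      | none => simp
      | some k => simp
    have hc : d.contains (catOf c) = true := by
      rw [PySem.Dict.contains_iff_mem_keys, hk]; exact catOf_mem_keys8 c
    have hk' : (d.modify (catOf c) [] (fun v => v ++ [c])).keys = keys8 := by
      rw [PySem.Dict.keys_modify, PySem.Dict.keys_insert_of_contains _ _ hc, hk]
    simp only [List.foldl_cons, hstep]
    exact ih _ hk'

theorem set_update_self (s : PySem.Set String) (l : List String) (h : ∀ x ∈ l, x ∈ s) :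
    PySem.Set.update s l = s := by
  induction l generalizing s with
  | nil => rfl
  | cons x l ih =>
    have : PySem.Set.update s (x :: l) = PySem.Set.update (s.add x) l := rfl
    rw [this, PySem.Set.add_of_mem (h x (by simp))]
    exact ih s (fun y hy => h y (by simp [hy]))

theorem groupsInit_keys : groupsInit.keys = keys8 := by decide

theorem groupsInit_getD (k : String) (hm : k ∈ keys8) : groupsInit.getD k [] = [] := by
  fin_cases hm <;> decide

theorem A_eq_canon (cards : List (List (String × String))) :
    group_cards_by_type cards = canon cards := by
  unfold group_cards_by_type canon
  rw [loopA cards groupsInit groupsInit_keys]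
  have hkeys : (cards.foldl (fun d c => d.modify (catOf c) [] (fun v => v ++ [c])) groupsInit).keys = keys8 := by
    rw [PySem.Dict.keys_foldl_modify_key cards catOf [] (fun _ c => fun v => v ++ [c]) groupsInit,
        groupsInit_keys]
    exact set_update_self _ _ (fun x hx => by
      obtain ⟨c, _, rfl⟩ := List.mem_map.mp hx; exact catOf_mem_keys8 c)
  have hnd : (cards.foldl (fun d c => d.modify (catOf c) [] (fun v => v ++ [c])) groupsInit).keys.Nodup := by
    rw [hkeys]; decide
  rw [PySem.Dict.items_eq_map_keys _ hnd [], hkeys]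
  congr 1
  refine List.map_congr_left (fun k hkm => ?_)
  have hG : (cards.foldl (fun d c => d.modify (catOf c) [] (fun v => v ++ [c])) groupsInit).getD k []
      = cards.filter (fun c => catOf c == k) := by
    have hpair : ((cards.map (fun c => (catOf c, c))).foldl
        (fun d p => d.modify p.1 [] (fun v => v ++ [p.2])) groupsInit)
        = cards.foldl (fun d c => d.modify (catOf c) [] (fun v => v ++ [c])) groupsInit := by
      rw [List.foldl_map]
    rw [← hpair, PySem.Dict.getD_foldl_modify_append, groupsInit_getD k hkm]
    simp [List.filter_map, Function.comp_def]
  rw [hG]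

theorem nodup_keys8 : keys8.Nodup := by decide

theorem loopB (cards : List (List (String × String))) :
    ∀ (cs pre : List String) (acc : List (String × List (List (String × String)))),
    pre ++ cs ++ ["Other"] = keys8 →
    cs.foldl stepB (acc, cards.filter (fun c => !decide (catOf c ∈ pre))) =
      (acc ++ (cs.map (fun k => (k, cards.filter (fun c => catOf c == k)))).filter
          (fun kv => !kv.2.isEmpty),
       cards.filter (fun c => !decide (catOf c ∈ pre ++ cs))) := by
  intro cs
  induction cs with
  | nil => intro pre acc _; simp
  | cons cat cs ih =>
    intro pre acc h
    have h8 : keys8 = pre ++ cat :: (cs ++ ["Other"]) := by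
      rw [← h]; simp
    have hnd : (pre ++ cat :: (cs ++ ["Other"])).Nodup := h8 ▸ nodup_keys8
    have hpre : cat ∉ pre := by
      rcases List.nodup_append.mp hnd with ⟨_, _, hdisj⟩
      intro hc; exact hdisj cat hc cat (by simp) rfl
    have hother : cat ≠ "Other" := by
      rcases List.nodup_append.mp hnd with ⟨_, hnd2, _⟩
      have h2 := List.nodup_cons.mp hnd2
      intro hc; exact h2.1 (by simp [hc])
    have hmatched : (cards.filter (fun c => !decide (catOf c ∈ pre))).filter
        (fun c => PySem.Str.isIn (PySem.Str.lower cat) (cardType c))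
        = cards.filter (fun c => catOf c == cat) := by
      rw [List.filter_filter]
      refine List.filter_congr (fun c _ => ?_)
      have hfwd : mtch cat c = true → catOf c ∈ pre ∨ catOf c = cat :=
        catOf_of_mtch pre cat (cs ++ ["Other"]) h8 c
      have hbwd : catOf c = cat → mtch cat c = true := fun hc => by
        have := mtch_of_catOf_ne_other c (hc ▸ hother); rwa [hc] at this
      show (PySem.Str.isIn (PySem.Str.lower cat) (cardType c) && !decide (catOf c ∈ pre))
          = (catOf c == cat)
      cases hm : mtch cat c with
      | false =>
        have hne : catOf c ≠ cat := fun hc => by rw [hbwd hc] at hm; cases hm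
        simp [mtch] at hm
        simp [hm, hne]
      | true =>
        by_cases hp : catOf c ∈ pre
        · have hne : catOf c ≠ cat := fun hc => hpre (hc ▸ hp)
          simp [mtch] at hm
          simp [hm, hp, hne]
        · have heq : catOf c = cat := (hfwd hm).resolve_left hp
          simp [mtch] at hm
          simp [hm, heq, hpre]
    have hremaining : (cards.filter (fun c => !decide (catOf c ∈ pre))).filter
        (fun c => !PySem.Str.isIn (PySem.Str.lower cat) (cardType c))
        = cards.filter (fun c => !decide (catOf c ∈ pre ++ [cat])) := by
      rw [List.filter_filter]
      refine List.filter_congr (fun c _ => ?_)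
      have hfwd : mtch cat c = true → catOf c ∈ pre ∨ catOf c = cat :=
        catOf_of_mtch pre cat (cs ++ ["Other"]) h8 c
      have hbwd : catOf c = cat → mtch cat c = true := fun hc => by
        have := mtch_of_catOf_ne_other c (hc ▸ hother); rwa [hc] at this
      show ((!PySem.Str.isIn (PySem.Str.lower cat) (cardType c)) && !decide (catOf c ∈ pre))
          = (!decide (catOf c ∈ pre ++ [cat]))
      cases hm : mtch cat c with
      | true =>
        have hmem : catOf c ∈ pre ++ [cat] := by
          rcases hfwd hm with h1 | h2
          · exact List.mem_append.mpr (Or.inl h1)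
          · exact List.mem_append.mpr (Or.inr (by simp [h2]))
        simp [mtch] at hm
        simp [hm, hmem]
      | false =>
        by_cases hp : catOf c ∈ pre
        · have hmem : catOf c ∈ pre ++ [cat] := List.mem_append.mpr (Or.inl hp)
          simp [mtch] at hm
          simp [hm, hp, hmem]
        · have hne : catOf c ≠ cat := fun hc => by rw [hbwd hc] at hm; cases hm
          have hnmem : catOf c ∉ pre ++ [cat] := by
            intro hmem
            rcases List.mem_append.mp hmem with h1 | h2
            · exact hp h1
            · exact hne (by simpa using h2)
          simp [mtch] at hm
          simp [hm, hp, hnmem]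
    have hstep : stepB (acc, cards.filter (fun c => !decide (catOf c ∈ pre))) cat
        = (acc ++ ([(cat, cards.filter (fun c => catOf c == cat))].filter (fun kv => !kv.2.isEmpty)),
           cards.filter (fun c => !decide (catOf c ∈ pre ++ [cat]))) := by
      simp only [stepB, hmatched, hremaining]
      by_cases he : (cards.filter (fun c => catOf c == cat)).isEmpty <;> simp [he]
    rw [List.foldl_cons, hstep,
        ih (pre ++ [cat]) (acc ++ ([(cat, cards.filter (fun c => catOf c == cat))].filter (fun kv => !kv.2.isEmpty))) (by simpa using h)]
    simp only [Prod.mk.injEq]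
    constructor
    · by_cases he : (cards.filter (fun c => catOf c == cat)).isEmpty
      · simp [he]
      · simp [he, List.append_assoc]
    · simp only [← List.append_cons]

theorem catOf_other_iff (c : List (String × String)) :
    (catOf c ∉ catsB) ↔ catOf c = "Other" := by
  have hmem := catOf_mem_keys8 c
  have hk : keys8 = catsB ++ ["Other"] := by decide
  rw [hk] at hmem
  constructor
  · intro h
    rcases List.mem_append.mp hmem with h1 | h2
    · exact absurd h1 h
    · simpa using h2
  · intro h hmem2
    rw [h] at hmem2
    exact absurd hmem2 (by decide)

theorem B_eq_canon (cards : List (List (String × String))) :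
    group_cards_by_type_alt cards = canon cards := by
  unfold group_cards_by_type_alt canon
  have h0 : cards.filter (fun c => !decide (catOf c ∈ ([] : List String))) = cards := by
    simp
  have := loopB cards catsB [] []
  rw [show ([] : List String) ++ catsB ++ ["Other"] = keys8 from by decide] at this
  have hfold := this rfl
  rw [h0] at hfold
  rw [hfold]
  have hrem : cards.filter (fun c => !decide (catOf c ∈ ([] : List String) ++ catsB))
      = cards.filter (fun c => catOf c == "Other") := by
    refine List.filter_congr (fun c _ => ?_)
    have := catOf_other_iff c
    have hno : "Other" ∉ catsB := by decide
    by_cases hc : catOf c = "Other"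
    · simp [hc, hno]
    · have hmemB : catOf c ∈ catsB := by
        by_contra hb; exact hc (this.mp hb)
      simp [hc, hmemB]
  rw [hrem]
  have hsplit : keys8 = catsB ++ ["Other"] := by decide
  rw [hsplit, List.map_append, List.filter_append]
  simp only [List.nil_append, List.map_cons, List.map_nil]
  by_cases he : (cards.filter (fun c => catOf c == "Other")).isEmpty <;> simp [he]

-- ===== VERDICT (by name: the statement is the Claim_ definition above) =====
theorem group_cards_by_type_spec : Claim_equal_group_cards_by_type := by
  intro cards _
  unfold Spec_group_cards_by_type
  rw [A_eq_canon, B_eq_canon]
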